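-- pv_equiv track=rewrite | github.com/portkeyss/cb2 | 2047-number-of-valid-words-in-a-sentence/2047-number-of-valid-words-in-a-sentence.py | countValidWords
-- ===== SOURCE A (Python) =====
-- def countValidWords(sentence: str) -> int:
--     words = sentence.split(" ")
--     res = 0
--     for word in words:
--         if len(word)==0: continue
--         valid = True
--         hypen = False
--         for i in range(len(word)):
--             if word[i].isnumeric():
--                 valid = False
--                 break
--             if word[i]=="-":
--                 if hypen or i==0 or i==len(word)-1 or not word[i-1].islower() or not word[i+1].islower():
--                     valid = False
--                     break
--                 hypen = True
--             elif word[i] in ",.!":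
--                 if i!=len(word)-1:
--                     valid = False
--                     break
--         if valid: res += 1
--     return res
-- ===== SOURCE B (Python) =====
-- def valid(w):
--     if not w:
--         return False
--     if any(c.isnumeric() for c in w):
--         return False
--     n = len(w)
--     for i, c in enumerate(w):
--         if c in ",.!" and i != n - 1:
--             return False
--     h = w.count('-')
--     if h > 1:
--         return False
--     if h == 1:
--         i = w.index('-')
--         if i == 0 or i == n - 1:
--             return False
--         if not w[i - 1].islower() or not w[i + 1].islower():
--             return False
--     return True
--
--
-- def countValidWords(sentence: str) -> int:
--     return sum(valid(w) for w in sentence.split(" "))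
-- ===== Notes on version B (the rewrite author's own statement) =====
-- stated objective: simpler
-- what changed: A's single indexed loop with a break and a hyphen flag is replaced by a per-word validator made of independent per-rule passes: a no-digit scan, a punctuation-position scan, then a hyphen count plus one index lookup with a neighbour check.
import Mathlib
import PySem

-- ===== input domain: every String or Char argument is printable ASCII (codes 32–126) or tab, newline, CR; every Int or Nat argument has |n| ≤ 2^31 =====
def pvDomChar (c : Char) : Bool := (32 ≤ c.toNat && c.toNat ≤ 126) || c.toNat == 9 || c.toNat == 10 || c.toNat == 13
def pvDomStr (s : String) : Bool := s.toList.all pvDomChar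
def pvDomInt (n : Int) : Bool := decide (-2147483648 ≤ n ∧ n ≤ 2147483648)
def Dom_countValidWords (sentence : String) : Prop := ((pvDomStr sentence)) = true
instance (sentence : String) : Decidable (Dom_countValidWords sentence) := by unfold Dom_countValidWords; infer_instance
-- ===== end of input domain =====

-- B replaces A's single indexed loop (with break and a hyphen flag) by a per-word validator
-- made of independent per-rule passes; objective: simpler decomposition, no speed claim.

-- ===== PORT A =====
-- A's inner 'for i in range(len(word))' with its break/valid flag, transcribed as recursion
-- over the index list; '.isnumeric()'/'.islower()' ported as PySem.Chars.isdigit/islower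
-- (exact on the printable-ASCII input domain).
def pvLoopA (w : List Char) (idxs : List Nat) (hypen : Bool) : Bool :=
  match idxs with
  | [] => true
  | i :: rest =>
    if PySem.Chars.isdigit (w.getD i ' ') then false
    else if w.getD i ' ' = '-' then
      if hypen || i == 0 || i == w.length - 1
          || !PySem.Chars.islower (w.getD (i - 1) ' ')
          || !PySem.Chars.islower (w.getD (i + 1) ' ') then false
      else pvLoopA w rest true
    else if w.getD i ' ' = ',' ∨ w.getD i ' ' = '.' ∨ w.getD i ' ' = '!' then
      if i ≠ w.length - 1 then false else pvLoopA w rest hypen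
    else pvLoopA w rest hypen

def countValidWords (sentence : String) : Int :=
  (PySem.Chars.splitOn sentence.toList [' ']).foldl (fun res w =>
    if w.length = 0 then res
    else if pvLoopA w (List.range w.length) false then res + 1
    else res) 0

-- ===== PORT B =====
-- per-word validator 'valid(w)' from Source B: each rule in its own pass.
def pvValid (w : List Char) : Bool :=
  if w = [] then false
  else if w.any PySem.Chars.isdigit then false
  else if (PySem.List.enumerate w).any
      (fun p => (p.2 == ',' || p.2 == '.' || p.2 == '!') && p.1 != (w.length : Int) - 1) then false
  else
    let h := w.count '-'
    if h > 1 then false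
    else if h = 1 then
      let i := (PySem.List.index? w '-').getD 0  -- h = 1 ⇒ index? is some; default unreachable
      if i = 0 ∨ i = w.length - 1 then false
      else if !PySem.Chars.islower (w.getD (i - 1) ' ')
           || !PySem.Chars.islower (w.getD (i + 1) ' ') then false
      else true
    else true

def countValidWords_alt (sentence : String) : Int :=
  ((PySem.Chars.splitOn sentence.toList [' ']).map
    (fun w => if pvValid w then (1 : Int) else 0)).sum

-- ===== PRECONDITION & SPEC =====
def Spec_countValidWords (sentence : String) (out : Int) : Prop := out = countValidWords_alt sentence
instance (sentence : String) (out : Int) : Decidable (Spec_countValidWords sentence out) := by unfold Spec_countValidWords; infer_instance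

-- ===== CLAIM (what is proved, stated in full; the proofs are below) =====
def Claim_equal_countValidWords : Prop := ∀ (sentence : String), Dom_countValidWords sentence → Spec_countValidWords sentence (countValidWords sentence)

-- ===== LEMMAS AND PROOFS =====

-- the per-index condition A's inner loop enforces
def pvChk (w : List Char) (j : Nat) : Prop :=
  ¬ PySem.Chars.isdigit (w.getD j ' ') = true ∧
  (w.getD j ' ' = '-' →
    j ≠ 0 ∧ j ≠ w.length - 1 ∧
    PySem.Chars.islower (w.getD (j - 1) ' ') = true ∧
    PySem.Chars.islower (w.getD (j + 1) ' ') = true) ∧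
  ((w.getD j ' ' = ',' ∨ w.getD j ' ' = '.' ∨ w.getD j ' ' = '!') → j = w.length - 1)

-- A's loop = "every index passes pvChk and (hyphens seen so far + remaining) ≤ 1"
lemma pvLoopA_iff (w : List Char) :
    ∀ (idxs : List Nat) (h : Bool), pvLoopA w idxs h = true ↔
      ((∀ j ∈ idxs, pvChk w j) ∧
        idxs.countP (fun j => w.getD j ' ' == '-') + (if h then 1 else 0) ≤ 1) := by
  intro idxs
  induction idxs with
  | nil => intro h; cases h <;> simp [pvLoopA]
  | cons i rest ih =>
    intro h
    rw [List.forall_mem_cons, List.countP_cons]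
    simp only [pvLoopA]
    by_cases hd : PySem.Chars.isdigit (w.getD i ' ') = true
    · rw [if_pos hd]
      apply iff_of_false (by simp)
      rintro ⟨⟨hci, -⟩, -⟩
      simp only [pvChk] at hci
      exact hci.1 hd
    · rw [if_neg hd]
      by_cases hh : w.getD i ' ' = '-'
      · rw [if_pos hh]
        have hbeq : (w.getD i ' ' == '-') = true := by simp only [beq_iff_eq]; exact hh
        by_cases hbad : (h || i == 0 || i == w.length - 1
            || !PySem.Chars.islower (w.getD (i - 1) ' ')
            || !PySem.Chars.islower (w.getD (i + 1) ' ')) = true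
        · rw [if_pos hbad]
          apply iff_of_false (by simp)
          rintro ⟨⟨hci, -⟩, hcnt⟩
          simp only [pvChk] at hci
          obtain ⟨h1, h2, h3, h4⟩ := hci.2.1 hh
          simp only [Bool.or_eq_true, beq_iff_eq, Bool.not_eq_true'] at hbad
          rcases hbad with ((((hb | hb) | hb) | hb) | hb)
          · rw [hbeq, hb] at hcnt; simp only [reduceIte] at hcnt; omega
          · exact h1 hb
          · exact h2 hb
          · rw [h3] at hb; simp at hb
          · rw [h4] at hb; simp at hb
        · rw [if_neg hbad, ih true]
          simp only [Bool.or_eq_true, beq_iff_eq, Bool.not_eq_true', not_or,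
            Bool.not_eq_true, Bool.not_eq_false] at hbad
          obtain ⟨⟨⟨⟨hb1, hb2⟩, hb3⟩, hb4⟩, hb5⟩ := hbad
          subst hb1
          constructor
          · rintro ⟨hall, hcnt⟩
            refine ⟨⟨?_, hall⟩, ?_⟩
            · simp only [pvChk]
              refine ⟨hd, fun _ => ⟨hb2, hb3, hb4, hb5⟩, ?_⟩
              intro hc; exfalso
              rcases hc with hc | hc | hc <;> rw [hc] at hh <;> exact absurd hh (by decide)
            · rw [hbeq]; simp only [reduceIte, Bool.false_eq_true, if_false] at hcnt ⊢; omega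
          · rintro ⟨⟨-, hall⟩, hcnt⟩
            refine ⟨hall, ?_⟩
            rw [hbeq] at hcnt; simp only [reduceIte, Bool.false_eq_true, if_false] at hcnt ⊢; omega
      · rw [if_neg hh]
        have hbeq : (w.getD i ' ' == '-') = false := by simp only [beq_eq_false_iff_ne]; exact hh
        rw [hbeq]
        simp only [Bool.false_eq_true, if_false, Nat.add_zero]
        by_cases hp : w.getD i ' ' = ',' ∨ w.getD i ' ' = '.' ∨ w.getD i ' ' = '!'
        · rw [if_pos hp]
          by_cases hl : i ≠ w.length - 1
          · rw [if_pos hl]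
            apply iff_of_false (by simp)
            rintro ⟨⟨hci, -⟩, -⟩
            simp only [pvChk] at hci
            exact hl (hci.2.2 hp)
          · rw [if_neg hl, ih h]
            have hl' : i = w.length - 1 := not_not.mp hl
            constructor
            · rintro ⟨hall, hcnt⟩
              refine ⟨⟨?_, hall⟩, hcnt⟩
              simp only [pvChk]
              exact ⟨hd, fun hc => absurd hc hh, fun _ => hl'⟩
            · rintro ⟨⟨-, hall⟩, hcnt⟩
              exact ⟨hall, hcnt⟩
        · rw [if_neg hp, ih h]
          constructor
          · rintro ⟨hall, hcnt⟩
            refine ⟨⟨?_, hall⟩, hcnt⟩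
            simp only [pvChk]
            exact ⟨hd, fun hc => absurd hc hh, fun hc => absurd hc hp⟩
          · rintro ⟨⟨-, hall⟩, hcnt⟩
            exact ⟨hall, hcnt⟩

lemma pvCountP_range (w : List Char) (v : Char) :
    (List.range w.length).countP (fun j => w.getD j ' ' == v) = w.count v := by
  induction w with
  | nil => simp
  | cons c t ih =>
    simp only [List.length_cons, List.range_succ_eq_map, List.countP_cons, List.countP_map,
      Function.comp_def, List.getD_cons_succ, List.getD_cons_zero, List.count_cons]
    rw [ih]

lemma pvDup_aux {w : List Char} {v : Char} {i j : Nat} (hij : i < j) (hj : j < w.length)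
    (hvi : w[i]'(by omega) = v) (hvj : w[j] = v) : List.Duplicate v w := by
  have h1 : List.drop i w = v :: List.drop (i+1) w := by
    conv_rhs => rw [← hvi]
    exact (List.getElem_cons_drop ..).symm
  have h2 : List.Sublist [v] (List.drop (i+1) w) := by
    rw [List.singleton_sublist]
    have : v = (List.drop (i+1) w)[j - (i+1)]'(by simp; omega) := by
      simp only [List.getElem_drop]; rw [← hvj]; congr 1; omega
    rw [this]; exact List.getElem_mem _
  have h3 : List.Sublist [v, v] (List.drop i w) := h1 ▸ List.Sublist.cons₂ v h2
  exact List.duplicate_iff_sublist.mpr (h3.trans (List.drop_sublist i w))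

lemma pvCount_le_one_unique {w : List Char} {v : Char} (hc : w.count v ≤ 1)
    {i j : Nat} (hi : i < w.length) (hj : j < w.length)
    (hvi : w[i] = v) (hvj : w[j] = v) : i = j := by
  by_contra hne
  have hdup : List.Duplicate v w := by
    rcases Nat.lt_or_ge i j with h | h
    · exact pvDup_aux h hj hvi hvj
    · exact pvDup_aux (by omega) hi hvj hvi
  have := List.duplicate_iff_two_le_count.mp hdup
  omega

-- B's validator = the same characterization
lemma pvValid_iff (w : List Char) (hne : w ≠ []) :
    pvValid w = true ↔ ((∀ j, j < w.length → pvChk w j) ∧ w.count '-' ≤ 1) := by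
  have hn1 : 1 ≤ w.length := List.length_pos_iff.mpr hne
  rw [pvValid, if_neg hne]
  by_cases hd : w.any PySem.Chars.isdigit = true
  · rw [if_pos hd]
    apply iff_of_false (by simp)
    rintro ⟨hall, -⟩
    obtain ⟨c, hc, hcd⟩ := List.any_eq_true.mp hd
    obtain ⟨j, hj, rfl⟩ := List.mem_iff_getElem.mp hc
    exact (hall j hj).1 (by rw [List.getD_eq_getElem _ _ hj]; exact hcd)
  · rw [if_neg hd]
    have hdall := List.any_eq_false.mp (Bool.not_eq_true _ ▸ hd)
    by_cases hp : (PySem.List.enumerate w).any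
        (fun p => (p.2 == ',' || p.2 == '.' || p.2 == '!') && p.1 != (w.length : Int) - 1) = true
    · rw [if_pos hp]
      apply iff_of_false (by simp)
      rintro ⟨hall, -⟩
      obtain ⟨q, hq, hqc⟩ := List.any_eq_true.mp hp
      obtain ⟨k, hk, rfl⟩ := (PySem.List.mem_enumerate_iff w 0 q).mp hq
      simp only [Bool.and_eq_true, Bool.or_eq_true, beq_iff_eq, bne_iff_ne] at hqc
      have hkl : k = w.length - 1 := (hall k hk).2.2 (by
        rw [List.getD_eq_getElem _ _ hk]
        rcases hqc.1 with (h | h) | h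
        exacts [Or.inl h, Or.inr (Or.inl h), Or.inr (Or.inr h)])
      apply hqc.2
      rw [hkl]; omega
    · rw [if_neg hp]
      have hpall := List.any_eq_false.mp (Bool.not_eq_true _ ▸ hp)
      have hpunct : ∀ j (hj : j < w.length),
          (w[j] = ',' ∨ w[j] = '.' ∨ w[j] = '!') → j = w.length - 1 := by
        intro j hj hjp
        have := hpall (((0:Int) + j, w[j])) ((PySem.List.mem_enumerate_iff w 0 _).mpr ⟨j, hj, rfl⟩)
        simp only [Bool.not_eq_true, Bool.and_eq_false_iff, Bool.or_eq_false_iff,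
          beq_eq_false_iff_ne, bne_eq_false_iff_eq] at this
        rcases this with h1 | h1
        · rcases hjp with h|h|h <;> simp [h] at h1
        · omega
      simp only []
      by_cases h2 : w.count '-' > 1
      · rw [if_pos h2]
        apply iff_of_false (by simp); rintro ⟨-, hc⟩; omega
      · rw [if_neg h2]
        by_cases h1 : w.count '-' = 1
        · rw [if_pos h1]
          have hmem : '-' ∈ w := List.count_pos_iff.mp (by omega)
          obtain ⟨i0, hi0some⟩ := Option.isSome_iff_exists.mp
            ((PySem.List.index?_isSome_iff w '-').mpr hmem)
          obtain ⟨hi0, hvi0, -⟩ := PySem.List.getElem_of_index?_eq_some hi0some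
          rw [hi0some]
          simp only [Option.getD_some]
          have huniq : ∀ (j : Nat) (hj : j < w.length), w[j]'hj = '-' → j = i0 := by
            intro j hj hvj
            exact pvCount_le_one_unique (by omega) hj hi0 hvj hvi0
          by_cases hbd : i0 = 0 ∨ i0 = w.length - 1
          · rw [if_pos hbd]
            apply iff_of_false (by simp); rintro ⟨hall, -⟩
            have := (hall i0 hi0).2.1 (by rw [List.getD_eq_getElem _ _ hi0]; exact hvi0)
            rcases hbd with h|h
            · exact this.1 h
            · exact this.2.1 h
          · rw [if_neg hbd]
            rw [not_or] at hbd
            by_cases hlo : (!PySem.Chars.islower (w.getD (i0 - 1) ' ')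
                || !PySem.Chars.islower (w.getD (i0 + 1) ' ')) = true
            · rw [if_pos hlo]
              apply iff_of_false (by simp); rintro ⟨hall, -⟩
              have := (hall i0 hi0).2.1 (by rw [List.getD_eq_getElem _ _ hi0]; exact hvi0)
              simp only [Bool.or_eq_true, Bool.not_eq_true'] at hlo
              rcases hlo with h|h
              · rw [this.2.2.1] at h; simp at h
              · rw [this.2.2.2] at h; simp at h
            · rw [if_neg hlo]
              simp only [Bool.or_eq_true, Bool.not_eq_true', not_or] at hlo
              apply iff_of_true rfl
              refine ⟨?_, by omega⟩
              intro j hj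
              refine ⟨?_, ?_, ?_⟩
              · rw [List.getD_eq_getElem _ _ hj]
                simpa using hdall _ (List.getElem_mem hj)
              · intro hjh
                have hji : j = i0 := huniq j hj (by rw [← List.getD_eq_getElem _ _ hj]; exact hjh)
                subst hji
                exact ⟨hbd.1, hbd.2, Bool.not_eq_false _ ▸ hlo.1, Bool.not_eq_false _ ▸ hlo.2⟩
              · intro hjp
                apply hpunct j hj
                rwa [← List.getD_eq_getElem _ _ hj]
        · rw [if_neg h1]
          have h0 : w.count '-' = 0 := by omega
          apply iff_of_true rfl
          refine ⟨?_, by omega⟩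
          intro j hj
          refine ⟨?_, ?_, ?_⟩
          · rw [List.getD_eq_getElem _ _ hj]
            simpa using hdall _ (List.getElem_mem hj)
          · intro hjh
            exfalso
            have hgj : w[j] = '-' := by rw [← List.getD_eq_getElem _ _ hj]; exact hjh
            have : '-' ∈ w := hgj ▸ List.getElem_mem hj
            exact absurd (List.count_pos_iff.mpr this) (by omega)
          · intro hjp
            apply hpunct j hj
            rwa [← List.getD_eq_getElem _ _ hj]

-- the two per-word verdicts coincide on nonempty words
lemma pvWord_eq (w : List Char) (hne : w ≠ []) :
    pvLoopA w (List.range w.length) false = pvValid w := by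
  rw [Bool.eq_iff_iff, pvLoopA_iff, pvValid_iff w hne, pvCountP_range]
  simp [List.mem_range]

-- ===== VERDICT (by name: the statement is the Claim_ definition above) =====
theorem countValidWords_spec : Claim_equal_countValidWords := by
  intro s _
  unfold Spec_countValidWords countValidWords countValidWords_alt
  rw [PySem.List.foldl_congr_mem _ _
      (fun res w => res + (if pvValid w then (1 : Int) else 0)) 0 ?_]
  · rw [PySem.List.foldl_add]
    simp
  · intro acc w _
    by_cases hz : w.length = 0
    · rw [if_pos hz]
      have : w = [] := List.length_eq_zero_iff.mp hz
      subst this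
      simp [pvValid]
    · rw [if_neg hz]
      have hne : w ≠ [] := by
        intro h; exact hz (by simp [h])
      rw [pvWord_eq w hne]
      by_cases hv : pvValid w = true <;> simp [hv]
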